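-- pv_equiv track=rewrite | github.com/as821/sparse-manifold-transform | src/laplacian.py | _simplify_neighbor_list
-- ===== SOURCE A (Python) =====
-- def _simplify_neighbor_list(nbrs):
--     # Combine any adjacent duplicate neighbors
--     idx = 0
--     while idx < len(nbrs) and len(nbrs) > 1:
--         n = nbrs[idx]
--         ni = nbrs[idx - 1]
--         if n == ni:     # all "neighbors" have been reduced to their connected component parents, can just check equality here
--             del nbrs[idx - 1]
--         else:           # only move forward once this neighbor + its previous neighbor in the list are different
--             idx += 1
--     return nbrs
-- ===== SOURCE B (Python) =====
-- def _simplify_neighbor_list(nbrs):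
--     # One pass: build a new list appending only elements that differ from the
--     # previous kept one, then a single cyclic wrap collapse of last vs first.
--     # (A mutates nbrs in place; B leaves it untouched and returns a new list.)
--     out = []
--     for x in nbrs:
--         if not out or out[-1] != x:
--             out.append(x)
--     if len(out) > 1 and out[-1] == out[0]:
--         out.pop()
--     return out
-- ===== Notes on version B (the rewrite author's own statement) =====
-- stated objective: faster
-- what changed: Replaces the O(n^2) while-loop with in-place mid-list deletions by a single linear pass that appends non-duplicate elements to a fresh list plus one final first/last wrap check (return value only: A mutates its argument, B does not).
import Mathlib
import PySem

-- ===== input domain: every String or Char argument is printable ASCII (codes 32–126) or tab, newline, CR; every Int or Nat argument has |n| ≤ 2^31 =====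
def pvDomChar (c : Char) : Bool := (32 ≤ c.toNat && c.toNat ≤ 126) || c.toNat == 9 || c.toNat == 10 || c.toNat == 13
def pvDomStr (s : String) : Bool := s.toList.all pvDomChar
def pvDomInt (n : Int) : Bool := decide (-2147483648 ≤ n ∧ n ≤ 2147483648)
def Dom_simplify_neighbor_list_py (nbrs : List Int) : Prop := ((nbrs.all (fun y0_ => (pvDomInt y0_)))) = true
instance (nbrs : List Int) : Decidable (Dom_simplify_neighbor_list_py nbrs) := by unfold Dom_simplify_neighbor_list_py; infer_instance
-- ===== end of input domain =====

-- B replaces A's quadratic in-place deletion loop by one linear append pass plus a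
-- single cyclic wrap check; equivalence is about the RETURN value only (A mutates
-- its argument in place, B does not).


-- ===== PORT A =====
-- the while loop; idx starts at 0 and is only ever incremented, so it is a Nat.
-- fuel is only a totality device: each iteration either increments idx or shortens
-- nbrs, so 2*len(nbrs)+1 steps always suffice and the 0-fuel branch is unreachable.
-- `del nbrs[idx-1]`: the only reachable negative Python index is -1 (at idx = 0),
-- where `del` removes the last element; otherwise it removes at idx-1 — exact.
def pvLoopA (fuel : Nat) (nbrs : List Int) (idx : Nat) : List Int :=
  match fuel with
  | 0 => nbrs
  | fuel + 1 =>
    if idx < nbrs.length ∧ 1 < nbrs.length then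
      -- n = nbrs[idx]; ni = nbrs[idx - 1]
      if (PySem.List.pyGet? nbrs (idx : Int)).getD 0 =
          (PySem.List.pyGet? nbrs ((idx : Int) - 1)).getD 0 then
        pvLoopA fuel (if idx = 0 then nbrs.dropLast else nbrs.eraseIdx (idx - 1)) idx
      else
        pvLoopA fuel nbrs (idx + 1)
    else nbrs

def simplify_neighbor_list_py (nbrs : List Int) : List Int := pvLoopA (2 * nbrs.length + 1) nbrs 0

-- ===== PORT B =====
def simplify_neighbor_list_py_alt (nbrs : List Int) : List Int :=
  let out := nbrs.foldl (fun out x => if out.getLast? = some x then out else out ++ [x]) []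
  if 1 < out.length ∧ out.getLast? = out.head? then out.dropLast else out

-- ===== PRECONDITION & SPEC =====
def Spec_simplify_neighbor_list_py (nbrs : List Int) (out : List Int) : Prop := out = simplify_neighbor_list_py_alt nbrs
instance (nbrs : List Int) (out : List Int) : Decidable (Spec_simplify_neighbor_list_py nbrs out) := by unfold Spec_simplify_neighbor_list_py; infer_instance

-- ===== CLAIM (what is proved, stated in full; the proofs are below) =====
def Claim_equal_simplify_neighbor_list_py : Prop := ∀ (nbrs : List Int), Dom_simplify_neighbor_list_py nbrs → Spec_simplify_neighbor_list_py nbrs (simplify_neighbor_list_py nbrs)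

-- ===== LEMMAS AND PROOFS =====

-- B's fold and wrap step, as named functions for the proofs
def pvDedup (acc xs : List Int) : List Int :=
  xs.foldl (fun out x => if out.getLast? = some x then out else out ++ [x]) acc

def pvWrap (out : List Int) : List Int :=
  if 1 < out.length ∧ out.getLast? = out.head? then out.dropLast else out

theorem pvConcatOf (l : List Int) (h : l ≠ []) : ∃ q a, l = q ++ [a] := by
  induction l using List.reverseRecOn with
  | nil => exact absurd rfl h
  | append_singleton q a _ => exact ⟨q, a, rfl⟩

theorem pvEraseAppend (q : List Int) (y : Int) (ys : List Int) :
    (q ++ y :: ys).eraseIdx q.length = q ++ ys := by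
  induction q with
  | nil => simp
  | cons b q ih => simpa [List.eraseIdx] using ih

theorem pvDedup_nil (acc : List Int) : pvDedup acc [] = acc := rfl

theorem pvDedup_cons (acc : List Int) (x : Int) (xs : List Int) :
    pvDedup acc (x :: xs) = pvDedup (if acc.getLast? = some x then acc else acc ++ [x]) xs := rfl

theorem pvDedup_append (acc xs ys : List Int) :
    pvDedup acc (xs ++ ys) = pvDedup (pvDedup acc xs) ys := by
  simp [pvDedup, List.foldl_append]

theorem pvDedup_ne_nil (acc xs : List Int) (h : acc ≠ []) : pvDedup acc xs ≠ [] := by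
  induction xs generalizing acc with
  | nil => exact h
  | cons x xs ih =>
    rw [pvDedup_cons]
    split_ifs with hx
    · exact ih acc h
    · exact ih _ (by simp)

theorem head?_pvDedup (acc xs : List Int) (h : acc ≠ []) :
    (pvDedup acc xs).head? = acc.head? := by
  induction xs generalizing acc with
  | nil => rfl
  | cons x xs ih =>
    rw [pvDedup_cons]
    split_ifs with hx
    · exact ih acc h
    · rw [ih _ (by simp)]
      cases acc with
      | nil => exact absurd rfl h
      | cons a t => simp

theorem getLast?_pvDedup (acc xs : List Int) (h : xs ≠ []) :
    (pvDedup acc xs).getLast? = xs.getLast? := by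
  induction xs generalizing acc with
  | nil => exact absurd rfl h
  | cons x xs ih =>
    rw [pvDedup_cons]
    cases xs with
    | nil =>
      split_ifs with hx
      · simpa using hx
      · simp [pvDedup]
    | cons y ys => rw [ih _ (by simp)]; simp

theorem pvWrap_snoc (o : List Int) (h a : Int) (hone : o ≠ []) (hhead : o.head? = some h)
    (hx : h = a) (hlo : o.getLast? ≠ some a) : pvWrap o = pvWrap (o ++ [a]) := by
  have hlen : 1 < (o ++ [a]).length := by
    have := List.length_pos_of_ne_nil hone
    simp only [List.length_append, List.length_cons, List.length_nil]; omega
  have hheadapp : (o ++ [a]).head? = some h := by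
    cases o with
    | nil => exact absurd rfl hone
    | cons b t => simpa using hhead
  rw [pvWrap, pvWrap,
    if_neg (by rw [hhead]; intro hc; exact hlo (by rw [hc.2, hx])),
    if_pos ⟨hlen, by rw [hheadapp]; simp [← hx]⟩, List.dropLast_concat]

-- phase idx ≥ 1: the loop is exactly B's dedup fold
theorem pvLoopA_succ (f : Nat) (nbrs : List Int) (idx : Nat) :
    pvLoopA (f + 1) nbrs idx =
      if idx < nbrs.length ∧ 1 < nbrs.length then
        if (PySem.List.pyGet? nbrs (idx : Int)).getD 0 =
            (PySem.List.pyGet? nbrs ((idx : Int) - 1)).getD 0 then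
          pvLoopA f (if idx = 0 then nbrs.dropLast else nbrs.eraseIdx (idx - 1)) idx
        else
          pvLoopA f nbrs (idx + 1)
      else nbrs := rfl

theorem pvLoopA_phase1 (rest pre : List Int) (fuel : Nat) (hp : pre ≠ [])
    (hf : rest.length < fuel) :
    pvLoopA fuel (pre ++ rest) pre.length = pvDedup pre rest := by
  induction rest generalizing pre fuel with
  | nil =>
    obtain ⟨f, rfl⟩ : ∃ f, fuel = f + 1 := ⟨fuel - 1, by omega⟩
    rw [pvLoopA_succ]
    simp [pvDedup]
  | cons x rs ih =>
    obtain ⟨f, rfl⟩ : ∃ f, fuel = f + 1 := ⟨fuel - 1, by omega⟩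
    have hfr : rs.length < f := by simp only [List.length_cons] at hf; omega
    obtain ⟨q, a, hq⟩ := pvConcatOf pre hp
    rw [pvLoopA_succ]
    have hlen : (pre ++ x :: rs).length = pre.length + rs.length + 1 := by
      simp only [List.length_append, List.length_cons]; omega
    have hpos : 0 < pre.length := List.length_pos_of_ne_nil hp
    have hcond : pre.length < (pre ++ x :: rs).length ∧ 1 < (pre ++ x :: rs).length := by
      constructor <;> omega
    rw [if_pos hcond]
    have hn : PySem.List.pyGet? (pre ++ x :: rs) (pre.length : Int) = some x :=
      PySem.List.pyGet?_append_length pre rs x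
    have hcast : ((pre.length : Int) - 1) = ((pre.length - 1 : Nat) : Int) := by omega
    have hni : PySem.List.pyGet? (pre ++ x :: rs) ((pre.length : Int) - 1) = some a := by
      rw [hcast, PySem.List.pyGet?_natCast, hq]
      have : q.length + 1 - 1 = q.length := by omega
      simp [this]
    rw [hn, hni]
    simp only [Option.getD_some]
    have hlast : pre.getLast? = some a := by rw [hq]; simp
    by_cases hx : x = a
    · rw [if_pos hx, if_neg (by omega)]
      have hdel : (pre ++ x :: rs).eraseIdx (pre.length - 1) = pre ++ rs := by
        rw [hq]
        have h1 : (q ++ [a]).length - 1 = q.length := by simp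
        have h2 : (q ++ [a]) ++ x :: rs = q ++ (a :: x :: rs) := by simp
        rw [h1, h2, pvEraseAppend]
        simp [hx]
      rw [hdel, ih pre f hp hfr, pvDedup_cons, if_pos (by rw [hlast, hx])]
    · rw [if_neg (by simpa [hlast] using hx)]
      have harr : pre ++ x :: rs = (pre ++ [x]) ++ rs := by simp
      have hl1 : pre.length + 1 = (pre ++ [x]).length := by simp
      rw [harr, hl1, ih (pre ++ [x]) f (by simp) hfr, pvDedup_cons,
        if_neg (by rw [hlast]; simpa using fun h => hx h.symm)]

-- phase idx = 0: strips trailing duplicates of the head, then phase 1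
theorem pvLoopA_phase0 (n : Nat) (rest : List Int) (hn : rest.length = n) (h : Int)
    (fuel : Nat) (hf : 2 * rest.length < fuel) :
    pvLoopA fuel (h :: rest) 0 = pvWrap (pvDedup [h] rest) := by
  induction n generalizing rest fuel with
  | zero =>
    have : rest = [] := List.eq_nil_of_length_eq_zero hn
    subst this
    obtain ⟨f, rfl⟩ : ∃ f, fuel = f + 1 := ⟨fuel - 1, by omega⟩
    rw [pvLoopA_succ]
    simp [pvDedup, pvWrap]
  | succ m ih =>
    have hne : rest ≠ [] := by intro hr; rw [hr] at hn; simp at hn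
    obtain ⟨f, rfl⟩ : ∃ f, fuel = f + 1 := ⟨fuel - 1, by omega⟩
    obtain ⟨rs, a, hq⟩ := pvConcatOf rest hne
    have hrs : rs.length = m := by rw [hq] at hn; simp at hn; omega
    rw [pvLoopA_succ]
    have hcond : 0 < (h :: rest).length ∧ 1 < (h :: rest).length := by
      have := List.length_pos_of_ne_nil hne
      simp only [List.length_cons]; omega
    rw [if_pos hcond]
    have hn0 : PySem.List.pyGet? (h :: rest) ((0 : Nat) : Int) = some h := by
      rw [PySem.List.pyGet?_natCast]; rfl
    have hlast : (h :: rest).getLast? = some a := by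
      rw [hq, ← List.cons_append]; exact List.getLast?_concat
    have hni : PySem.List.pyGet? (h :: rest) (((0 : Nat) : Int) - 1) = some a := by
      have : ((0 : Nat) : Int) - 1 = -1 := by omega
      rw [this, PySem.List.pyGet?_neg_one, hlast]
    rw [hn0, hni]
    simp only [Option.getD_some]
    have hone : pvDedup [h] rs ≠ [] := pvDedup_ne_nil _ _ (by simp)
    have hhead : (pvDedup [h] rs).head? = some h := by
      rw [head?_pvDedup _ _ (by simp)]; rfl
    by_cases hx : h = a
    · rw [if_pos hx]
      simp only [reduceIte]
      have hdl : (h :: rest).dropLast = h :: rs := by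
        rw [hq, ← List.cons_append, List.dropLast_concat]
      rw [hdl, ih rs hrs f (by omega)]
      rw [hq, pvDedup_append, pvDedup_cons, pvDedup_nil]
      by_cases hlo : (pvDedup [h] rs).getLast? = some a
      · rw [if_pos hlo]
      · rw [if_neg hlo]
        exact pvWrap_snoc _ h a hone hhead hx hlo
    · rw [if_neg hx]
      have h1 : (0 : Nat) + 1 = ([h] : List Int).length := rfl
      have harr : h :: rest = [h] ++ rest := rfl
      rw [harr, h1, pvLoopA_phase1 rest [h] f (by simp) (by omega)]
      have hlastd : (pvDedup [h] rest).getLast? = some a := by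
        rw [getLast?_pvDedup _ _ hne, hq]; exact List.getLast?_concat
      have hheadd : (pvDedup [h] rest).head? = some h := by
        rw [head?_pvDedup _ _ (by simp)]; rfl
      rw [pvWrap, if_neg (by rw [hlastd, hheadd]; intro ⟨_, hc⟩; exact hx (by injection hc with hc; omega))]

-- ===== VERDICT (by name: the statement is the Claim_ definition above) =====
theorem simplify_neighbor_list_py_spec : Claim_equal_simplify_neighbor_list_py := by
  intro nbrs _
  show simplify_neighbor_list_py nbrs = simplify_neighbor_list_py_alt nbrs
  cases nbrs with
  | nil => rfl
  | cons h rest =>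
    rw [simplify_neighbor_list_py,
      pvLoopA_phase0 rest.length rest rfl h (2 * (h :: rest).length + 1)
        (by simp only [List.length_cons]; omega)]
    have : simplify_neighbor_list_py_alt (h :: rest) = pvWrap (pvDedup [] (h :: rest)) := rfl
    rw [this, pvDedup_cons]
    simp
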